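-- pv_equiv track=rewrite | github.com/RenzeLou/AAAR-1.0 | scripts/subtask1_equation_generation_with_filtering.py | get_lhs_of_equation
-- ===== SOURCE A (Python) =====
-- def get_lhs_of_equation(latex_eq):
--     """
--     Get the left-hand side of the LaTeX equation up to the first equal sign that is not in a subscript or superscript.
--     """
--     # Track the number of open braces
--     brace_count = 0
--
--     # Iterate through each character in the string
--     for i, char in enumerate(latex_eq):
--         if char == '{':
--             brace_count += 1
--         elif char == '}':
--             brace_count -= 1
--         elif char == '=' and brace_count == 0:
--             # Return everything up to the `=` sign if we are not inside braces
--             return latex_eq[:i]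
--
--     # If no '=' symbol is found, return a empty string
--     return ""
-- ===== SOURCE B (Python) =====
-- def get_lhs_of_equation(latex_eq):
--     parts = latex_eq.split('=')
--     brace_count = 0
--     collected = []
--     for part in parts[:-1]:
--         brace_count += part.count('{') - part.count('}')
--         collected.append(part)
--         if brace_count == 0:
--             return '='.join(collected)
--     return ''
-- ===== Notes on version B (the rewrite author's own statement) =====
-- stated objective: faster
-- what changed: B replaces A's per-character Python loop (brace counter, enumerate, slice) by one str.split on the equals sign followed by a scan over the resulting segments, updating the brace balance per segment with str.count and rejoining the collected segments; splitting and counting run in C, giving a large constant-factor speedup.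
import Mathlib
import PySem

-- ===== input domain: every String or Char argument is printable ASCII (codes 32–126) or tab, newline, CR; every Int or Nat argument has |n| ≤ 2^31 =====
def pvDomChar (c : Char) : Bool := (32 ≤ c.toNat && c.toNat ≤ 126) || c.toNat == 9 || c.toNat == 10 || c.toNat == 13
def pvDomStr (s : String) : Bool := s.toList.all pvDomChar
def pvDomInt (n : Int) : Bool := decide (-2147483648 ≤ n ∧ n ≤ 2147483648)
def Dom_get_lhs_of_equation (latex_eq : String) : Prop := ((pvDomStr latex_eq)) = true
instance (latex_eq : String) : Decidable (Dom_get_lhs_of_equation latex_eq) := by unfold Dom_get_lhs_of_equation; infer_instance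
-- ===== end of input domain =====

-- B re-decomposes the task: split the string on '=' once, then scan the '='-delimited
-- segments keeping a running brace balance per segment (same asymptotics; measured constant-factor faster in CPython).

-- ===== PORT A =====
-- literal transliteration of A's character loop (brace_count, enumerate index, latex_eq[:i])
def pvAGo (s : String) : List Char → Int → Nat → String
  | [], _, _ => ""
  | c :: rest, bc, i =>
    if c = '{' then pvAGo s rest (bc + 1) (i + 1)
    else if c = '}' then pvAGo s rest (bc - 1) (i + 1)
    else if c = '=' ∧ bc = 0 then PySem.Str.slice s none (some (i : Int))
    else pvAGo s rest bc (i + 1)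

def get_lhs_of_equation (latex_eq : String) : String :=
  pvAGo latex_eq latex_eq.toList 0 0

-- ===== PORT B =====
-- literal transliteration of B: parts = latex_eq.split('='); loop over parts[:-1]
-- with brace_count += part.count('{') - part.count('}'), collected.append(part),
-- return '='.join(collected) as soon as brace_count == 0; else ''.
def pvBGo : List String → Int → List String → String
  | [], _, _ => ""
  | p :: rest, bc, collected =>
    let bc' := bc + (PySem.Str.count p "{" : Int) - (PySem.Str.count p "}" : Int)
    let collected' := collected ++ [p]
    if bc' = 0 then PySem.Str.join "=" collected' else pvBGo rest bc' collected'

def get_lhs_of_equation_alt (latex_eq : String) : String :=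
  pvBGo ((PySem.Str.split? latex_eq "=").getD []).dropLast 0 []

-- ===== PRECONDITION & SPEC =====
def Spec_get_lhs_of_equation (latex_eq : String) (out : String) : Prop := out = get_lhs_of_equation_alt latex_eq
instance (latex_eq : String) (out : String) : Decidable (Spec_get_lhs_of_equation latex_eq out) := by unfold Spec_get_lhs_of_equation; infer_instance

-- ===== CLAIM (what is proved, stated in full; the proofs are below) =====
def Claim_equal_get_lhs_of_equation : Prop := ∀ (latex_eq : String), Dom_get_lhs_of_equation latex_eq → Spec_get_lhs_of_equation latex_eq (get_lhs_of_equation latex_eq)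

-- ===== LEMMAS AND PROOFS =====

-- abstract version of A's loop: the prefix before the first top-level '=' (none = no such '=')
def pvFA : List Char → Int → Option (List Char)
  | [], _ => none
  | c :: rest, bc =>
    if c = '{' then (pvFA rest (bc + 1)).map (c :: ·)
    else if c = '}' then (pvFA rest (bc - 1)).map (c :: ·)
    else if c = '=' ∧ bc = 0 then some []
    else (pvFA rest bc).map (c :: ·)

-- reference split on '=' (Python str.split semantics for a single-char separator)
def pvSplit : List Char → List (List Char)
  | [] => [[]]
  | c :: rest => if c = '=' then [] :: pvSplit rest else (pvSplit rest).modifyHead (c :: ·)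

-- abstract version of B's loop over the '='-separated segments (already without the last one)
def pvGB : List (List Char) → Int → Option (List Char)
  | [], _ => none
  | p :: rest, bc =>
    let bc' := bc + (p.count '{' : Int) - (p.count '}' : Int)
    if bc' = 0 then some p else (pvGB rest bc').map (fun q => p ++ '=' :: q)

def pvDelta (c : Char) : Int := if c = '{' then 1 else if c = '}' then -1 else 0

theorem pvSplit_ne_nil (cs : List Char) : pvSplit cs ≠ [] := by
  cases cs with
  | nil => simp [pvSplit]
  | cons c rest =>
    simp only [pvSplit]
    split
    · simp
    · intro h
      have := pvSplit_ne_nil rest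
      cases hs : pvSplit rest with
      | nil => exact this hs
      | cons a t => rw [hs] at h; simp [List.modifyHead] at h

theorem pvCountGo_single (c : Char) : ∀ (fuel : Nat) (l : List Char) (acc : Nat),
    l.length ≤ fuel → PySem.Chars.count.go [c] fuel l acc = acc + l.count c := by
  intro fuel
  induction fuel with
  | zero => intro l acc h; cases l with
    | nil => simp [PySem.Chars.count.go]
    | cons a t => simp at h
  | succ n ih =>
    intro l acc h
    cases l with
    | nil => simp [PySem.Chars.count.go]
    | cons a t =>
      simp only [PySem.Chars.count.go]
      by_cases hc : c = a
      · subst hc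
        simp only [List.isPrefixOf, BEq.rfl, Bool.and_self, if_pos, List.length_cons,
          List.length_nil, List.drop_succ_cons, List.drop_zero]
        rw [ih t (acc + 1) (by simp at h; omega)]
        simp
        omega
      · have : List.isPrefixOf [c] (a :: t) = false := by
          simp [List.isPrefixOf]; exact fun h' => absurd h' hc
        rw [this]
        simp only [Bool.false_eq_true, if_false]
        rw [ih t acc (by simp at h; omega)]
        have : a ≠ c := fun h' => hc h'.symm
        simp [this]

theorem pvCount_single (l : List Char) (c : Char) :
    PySem.Chars.count l [c] = l.count c := by
  simp only [PySem.Chars.count]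
  rw [if_neg (by simp)]
  simpa using pvCountGo_single c l.length l 0 le_rfl

theorem pvSplitOnGo_eq : ∀ (fuel : Nat) (l : List Char) (cur : List Char) (acc : List (List Char)),
    l.length ≤ fuel →
    PySem.Chars.splitOn.go ['='] fuel l cur acc
      = acc.reverse ++ (pvSplit l).modifyHead (cur.reverse ++ ·) := by
  intro fuel
  induction fuel with
  | zero =>
    intro l cur acc h
    cases l with
    | nil => simp [PySem.Chars.splitOn.go, pvSplit, List.modifyHead]
    | cons a t => simp at h
  | succ n ih =>
    intro l cur acc h
    cases l with
    | nil => simp [PySem.Chars.splitOn.go, pvSplit, List.modifyHead]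
    | cons a t =>
      simp only [PySem.Chars.splitOn.go]
      by_cases ha : a = '='
      · subst ha
        have hp : List.isPrefixOf ['='] ('=' :: t) = true := by simp [List.isPrefixOf]
        rw [hp]
        simp only [if_true, List.length_cons, List.length_nil, List.drop_succ_cons, List.drop_zero]
        rw [ih t [] (cur.reverse :: acc) (by simp at h; omega)]
        simp only [pvSplit, List.modifyHead, List.reverse_cons, List.append_assoc,
          List.cons_append, List.nil_append]
        cases pvSplit t <;> simp
      · have hp : List.isPrefixOf ['='] (a :: t) = false := by
          simp [List.isPrefixOf]; exact fun h' => absurd h'.symm ha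
        rw [hp]
        simp only [Bool.false_eq_true, if_false]
        rw [ih t (a :: cur) acc (by simp at h; omega)]
        have hne := pvSplit_ne_nil t
        cases hs : pvSplit t with
        | nil => exact absurd hs hne
        | cons p ps =>
          simp [pvSplit, ha, hs, List.modifyHead]

theorem pvSplitOn_eq (l : List Char) :
    PySem.Chars.splitOn l ['='] = pvSplit l := by
  simp only [PySem.Chars.splitOn]
  rw [pvSplitOnGo_eq (l.length + 1) l [] [] (by omega)]
  cases pvSplit l <;> simp [List.modifyHead]

-- A's loop computes pvFA, rendered through latex_eq[:i]
theorem pvAGo_spec (s : String) : ∀ (cs : List Char) (bc : Int) (pre : List Char),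
    s.toList = pre ++ cs →
    pvAGo s cs bc pre.length
      = (match pvFA cs bc with
         | none => ""
         | some p => String.ofList (pre ++ p)) := by
  intro cs
  induction cs with
  | nil => intro bc pre h; simp [pvAGo, pvFA]
  | cons c rest ih =>
    intro bc pre h
    have hpre : s.toList = (pre ++ [c]) ++ rest := by simpa using h
    have hlen : (pre ++ [c]).length = pre.length + 1 := by simp
    simp only [pvAGo, pvFA]
    by_cases h1 : c = '{'
    · rw [if_pos h1, if_pos h1, ← hlen, ih (bc + 1) (pre ++ [c]) hpre]
      cases pvFA rest (bc + 1) <;> simp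
    · rw [if_neg h1, if_neg h1]
      by_cases h2 : c = '}'
      · rw [if_pos h2, if_pos h2, ← hlen, ih (bc - 1) (pre ++ [c]) hpre]
        cases pvFA rest (bc - 1) <;> simp
      · rw [if_neg h2, if_neg h2]
        by_cases h3 : c = '=' ∧ bc = 0
        · rw [if_pos h3, if_pos h3]
          apply String.toList_inj.mp
          simp [PySem.Str.slice, h, PySem.Chars.slice, PySem.List.slice_to_natCast]
        · rw [if_neg h3, if_neg h3, ← hlen, ih bc (pre ++ [c]) hpre]
          cases pvFA rest bc <;> simp

theorem pvGB_cons {c : Char} (_hc : c ≠ '=') (p : List Char) (tail : List (List Char)) (bc : Int) :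
    pvGB ((c :: p) :: tail) bc = (pvGB (p :: tail) (bc + pvDelta c)).map (c :: ·) := by
  have hb : bc + (((c :: p).count '{' : Nat) : Int) - (((c :: p).count '}' : Nat) : Int)
      = (bc + pvDelta c) + ((p.count '{' : Nat) : Int) - ((p.count '}' : Nat) : Int) := by
    by_cases h1 : c = '{' <;> by_cases h2 : c = '}' <;>
      simp_all [pvDelta, List.count_cons] <;> ring
  simp only [pvGB]
  rw [hb]
  split_ifs with h
  · simp
  · cases pvGB tail ((bc + pvDelta c) + ((p.count '{' : Nat) : Int) - ((p.count '}' : Nat) : Int)) <;> simp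

-- main bridge: A's character scan equals B's per-segment scan
theorem pvMain : ∀ (cs : List Char) (bc : Int),
    pvFA cs bc = pvGB ((pvSplit cs).dropLast) bc := by
  intro cs
  induction cs with
  | nil => intro bc; simp [pvFA, pvSplit, pvGB]
  | cons c rest ih =>
    intro bc
    by_cases hc : c = '='
    · subst hc
      cases hs : pvSplit rest with
      | nil => exact absurd hs (pvSplit_ne_nil rest)
      | cons x xs =>
        have hsd : (pvSplit ('=' :: rest)).dropLast = [] :: (x :: xs).dropLast := by
          simp [pvSplit, hs]
        rw [hsd]
        by_cases hbc : bc = 0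
        · subst hbc; simp [pvFA, pvGB]
        · simp only [pvFA, pvGB]
          rw [if_neg (by decide), if_neg (by decide), if_neg (by simp [hbc]),
            if_neg (by simpa using hbc)]
          rw [ih bc, ← hs]
          simp only [hs, List.count_nil, Nat.cast_zero, add_zero, sub_zero]
          cases pvGB ((x :: xs).dropLast) bc <;> simp
    · have hne := pvSplit_ne_nil rest
      have hstep : pvFA (c :: rest) bc = (pvFA rest (bc + pvDelta c)).map (c :: ·) := by
        by_cases h1 : c = '{'
        · simp [pvFA, pvDelta, h1]
        · by_cases h2 : c = '}'
          · simp [pvFA, pvDelta, h2, sub_eq_add_neg]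
          · simp [pvFA, pvDelta, h1, h2, hc]
      cases hs : pvSplit rest with
      | nil => exact absurd hs hne
      | cons x xs =>
        cases xs with
        | nil =>
          have hsd : (pvSplit (c :: rest)).dropLast = [] := by
            simp [pvSplit, hc, hs, List.modifyHead]
          rw [hsd, hstep, ih (bc + pvDelta c), hs]
          simp [pvGB]
        | cons y ys =>
          have hsd : (pvSplit (c :: rest)).dropLast = (c :: x) :: (y :: ys).dropLast := by
            simp [pvSplit, hc, hs, List.modifyHead]
          rw [hsd, hstep, ih (bc + pvDelta c), hs, pvGB_cons hc]
          simp

theorem pvIntercalate_cons (x : List Char) (m : List (List Char)) (hm : m ≠ []) :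
    List.intercalate ['='] (x :: m) = x ++ '=' :: List.intercalate ['='] m := by
  cases m with
  | nil => exact absurd rfl hm
  | cons y t => simp [List.intercalate, List.intersperse]

theorem pvIntercalate_merge : ∀ (l : List (List Char)) (a b : List Char),
    List.intercalate ['='] (l ++ [a, b]) = List.intercalate ['='] (l ++ [a ++ '=' :: b]) := by
  intro l
  induction l with
  | nil => intro a b; simp [List.intercalate, List.intersperse]
  | cons x t ih =>
    intro a b
    rw [List.cons_append, List.cons_append,
      pvIntercalate_cons x (t ++ [a, b]) (by simp),
      pvIntercalate_cons x (t ++ [a ++ '=' :: b]) (by simp), ih]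

theorem pvBGo_spec : ∀ (parts : List String) (bc : Int) (acc : List String),
    pvBGo parts bc acc
      = (match pvGB (parts.map String.toList) bc with
         | none => ""
         | some q => String.ofList (PySem.Chars.join ['='] ((acc.map String.toList) ++ [q]))) := by
  intro parts
  induction parts with
  | nil => intro bc acc; simp [pvBGo, pvGB]
  | cons p rest ih =>
    intro bc acc
    have hcnt1 : (PySem.Str.count p "{" : Int) = ((p.toList.count '{' : Nat) : Int) := by
      rw [PySem.Str.count_eq, show ("{" : String).toList = ['{'] from rfl, pvCount_single]
    have hcnt2 : (PySem.Str.count p "}" : Int) = ((p.toList.count '}' : Nat) : Int) := by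
      rw [PySem.Str.count_eq, show ("}" : String).toList = ['}'] from rfl, pvCount_single]
    simp only [pvBGo, List.map_cons, pvGB, hcnt1, hcnt2]
    split_ifs with h
    · simp [PySem.Str.join, PySem.Chars.join]
    · rw [ih]
      cases pvGB (rest.map String.toList)
          (bc + ((p.toList.count '{' : Nat) : Int) - ((p.toList.count '}' : Nat) : Int)) with
      | none => simp
      | some q =>
        simp only [Option.map_some]
        congr 1
        simp only [PySem.Chars.join, List.map_append, List.map_cons, List.map_nil,
          List.append_assoc, List.cons_append, List.nil_append]
        have := pvIntercalate_merge (acc.map String.toList) p.toList q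
        simpa using this

-- ===== VERDICT (by name: the statement is the Claim_ definition above) =====
theorem get_lhs_of_equation_spec : Claim_equal_get_lhs_of_equation := by
  intro s _
  unfold Spec_get_lhs_of_equation get_lhs_of_equation get_lhs_of_equation_alt
  have h1 := PySem.Str.split?_map s "="
  have hlit : ("=" : String).toList = ['='] := rfl
  rw [hlit, PySem.Chars.split?, if_neg (by simp), pvSplitOn_eq] at h1
  cases hsp : PySem.Str.split? s "=" with
  | none => rw [hsp] at h1; simp at h1
  | some ps =>
    rw [hsp] at h1
    simp only [Option.map_some, Option.some.injEq] at h1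
    have hA := pvAGo_spec s s.toList 0 [] (by simp)
    simp only [List.length_nil, List.nil_append] at hA
    rw [hA, pvBGo_spec]
    have hmap : ps.dropLast.map String.toList = (pvSplit s.toList).dropLast := by
      rw [← h1, List.map_dropLast]
    simp only [Option.getD_some, hmap, ← pvMain s.toList 0]
    cases hf : pvFA s.toList 0 with
    | none => simp
    | some p => simp [PySem.Chars.join, List.intercalate]
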